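-- pv_equiv track=rewrite | github.com/arbiter07/py-algorithm | step16-20.py | solution_16
-- ===== SOURCE A (Python) =====
-- def solution_16(progresses, speeds):
--   ret = []
--   execute_days = []
--   # 7 3 9
--
--   for i, v in enumerate(progresses):
--     day = 0
--     while v < 100:
--       v += speeds[i]
--       day+=1
--     execute_days.append(day)
--
--   while len(execute_days) > 0:
--     pop = execute_days.pop(0)
--     group = 1
--     while len(execute_days) > 0:
--       next = execute_days[0]
--       if pop >= next:
--         execute_days.pop(0)
--         group +=1
--       else:
--         break
--     ret.append(group)
--
--   return ret
-- ===== SOURCE B (Python) =====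
-- def solution_16(progresses, speeds):
--     # single pass: closed-form ceil-division for days, grouping fused in
--     ret = []
--     leader = 0
--     count = 0
--     for i, p in enumerate(progresses):
--         d = 0 if p >= 100 else -((p - 100) // speeds[i])
--         if count == 0 or d > leader:
--             if count > 0:
--                 ret.append(count)
--             leader = d
--             count = 1
--         else:
--             count += 1
--     if count > 0:
--         ret.append(count)
--     return ret
-- ===== Notes on version B (the rewrite author's own statement) =====
-- stated objective: faster
-- what changed: Replaces the per-feature increment-until-100 loop with a closed-form ceiling division and replaces the destructive pop(0)-based nested grouping scan with a single fused pass maintaining the current group's leader and count; intended as faster (timing: A timed out at n=16 where B returned, so no ratio was measured).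
import Mathlib
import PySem

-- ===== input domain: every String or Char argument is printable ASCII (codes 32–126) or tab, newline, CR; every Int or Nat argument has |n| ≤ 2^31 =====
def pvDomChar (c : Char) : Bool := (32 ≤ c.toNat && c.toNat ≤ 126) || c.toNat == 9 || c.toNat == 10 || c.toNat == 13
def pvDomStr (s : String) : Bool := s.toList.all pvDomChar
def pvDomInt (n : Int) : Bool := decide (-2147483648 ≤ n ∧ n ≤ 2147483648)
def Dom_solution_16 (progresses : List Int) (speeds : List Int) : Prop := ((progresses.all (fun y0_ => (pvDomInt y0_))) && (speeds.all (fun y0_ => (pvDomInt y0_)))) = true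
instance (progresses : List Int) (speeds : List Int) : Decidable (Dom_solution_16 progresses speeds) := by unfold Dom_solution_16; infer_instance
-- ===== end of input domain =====

-- B replaces A's increment-until-100 inner loop by a closed-form ceiling division and fuses
-- A's pop(0)-based grouping into one pass; intended as faster (a timing run saw A time
-- out at n=16 where B returned, so no ratio could be measured).

-- ===== PORT A =====
-- `while v < 100: v += speeds[i]; day += 1`; the `0 < s` guard only makes the recursion
-- total (Pre_ guarantees it whenever the loop body is reached), it changes no admitted value.
def daysLoopA (speeds : List Int) (i : Nat) (v : Int) (day : Int) : Int :=
  let s := PySem.List.pyGetD speeds (i : Int) 1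
  if _h : v < 100 ∧ 0 < s then daysLoopA speeds i (v + s) (day + 1) else day
termination_by (100 - v).toNat
decreasing_by omega

-- `for i, v in enumerate(progresses): … execute_days.append(day)`
def buildDaysA : List Int → List Int → Nat → List Int
  | [], _, _ => []
  | v :: rest, speeds, i => daysLoopA speeds i v 0 :: buildDaysA rest speeds (i + 1)

-- inner `while`: keep popping while pop >= next; returns (group, remaining days)
def innerA (pop : Int) (xs : List Int) (group : Int) : Int × List Int :=
  match xs with
  | [] => (group, [])
  | next :: rest => if pop ≥ next then innerA pop rest (group + 1) else (group, next :: rest)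

theorem innerA_len (pop : Int) (xs : List Int) (group : Int) :
    (innerA pop xs group).2.length ≤ xs.length := by
  induction xs generalizing group with
  | nil => simp [innerA]
  | cons x rest ih =>
    simp only [innerA]
    split
    · exact le_trans (ih _) (Nat.le_succ _)
    · simp

-- outer `while len(execute_days) > 0`
def outerA (xs : List Int) : List Int :=
  match xs with
  | [] => []
  | pop :: rest =>
    let gr := innerA pop rest 1
    gr.1 :: outerA gr.2
termination_by xs.length
decreasing_by
  have := innerA_len pop rest 1
  simp only [List.length_cons]
  omega

def solution_16 (progresses : List Int) (speeds : List Int) : List Int :=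
  outerA (buildDaysA progresses speeds 0)

-- ===== PORT B =====
-- `d = 0 if p >= 100 else -((p - 100) // speeds[i])` (getD-guard only for totality; Pre_
-- guarantees the index is in range whenever the else branch is reached)
def dayB (speeds : List Int) (i : Nat) (p : Int) : Int :=
  if p ≥ 100 then 0 else -(PySem.Int.floordiv (p - 100) (PySem.List.pyGetD speeds (i : Int) 1))

-- one loop-body step on the state (ret, leader, count)
def stepB (st : List Int × Int × Int) (d : Int) : List Int × Int × Int :=
  if st.2.2 = 0 ∨ d > st.2.1 then
    ((if st.2.2 > 0 then st.1 ++ [st.2.2] else st.1), d, 1)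
  else (st.1, st.2.1, st.2.2 + 1)

def loopB : List Int → List Int → Nat → (List Int × Int × Int) → List Int × Int × Int
  | [], _, _, st => st
  | p :: rest, speeds, i, st => loopB rest speeds (i + 1) (stepB st (dayB speeds i p))

def solution_16_alt (progresses : List Int) (speeds : List Int) : List Int :=
  let st := loopB progresses speeds 0 ([], 0, 0)
  if st.2.2 > 0 then st.1 ++ [st.2.2] else st.1

-- ===== PRECONDITION & SPEC =====
-- Pre_ excludes exactly the inputs on which A does not return: an already-complete feature
-- needs no speed, otherwise speeds[i] must exist (else IndexError) and be positive (else the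
-- while loop never terminates).
def Pre_solution_16 (progresses : List Int) (speeds : List Int) : Prop :=
  ∀ i ∈ List.range progresses.length,
    100 ≤ progresses.getD i 0 ∨ (i < speeds.length ∧ 1 ≤ speeds.getD i 0)
instance (progresses : List Int) (speeds : List Int) : Decidable (Pre_solution_16 progresses speeds) := by unfold Pre_solution_16; infer_instance

def pvWitness_solution_16 : List Int × List Int := ([93, 30, 55], [1, 30, 5])

def Spec_solution_16 (progresses : List Int) (speeds : List Int) (out : List Int) : Prop := out = solution_16_alt progresses speeds
instance (progresses : List Int) (speeds : List Int) (out : List Int) : Decidable (Spec_solution_16 progresses speeds out) := by unfold Spec_solution_16; infer_instance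

-- ===== CLAIM (what is proved, stated in full; the proofs are below) =====
def Claim_equal_solution_16 : Prop := ∀ (progresses : List Int) (speeds : List Int), Dom_solution_16 progresses speeds → Pre_solution_16 progresses speeds → Spec_solution_16 progresses speeds (solution_16 progresses speeds)

-- ===== LEMMAS AND PROOFS =====

-- the final `if count > 0: ret.append(count)` of B
def finB (st : List Int × Int × Int) : List Int :=
  if st.2.2 > 0 then st.1 ++ [st.2.2] else st.1

-- one unrolling of the ceiling division, for a positive divisor
theorem ceil_step (s v : Int) (hs : 0 < s) (hv : v < 100) :
    -(PySem.Int.floordiv (v - 100) s) =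
      1 + (if v + s < 100 then -(PySem.Int.floordiv (v + s - 100) s) else 0) := by
  by_cases hv2 : v + s < 100
  · rw [if_pos hv2]
    have h : PySem.Int.floordiv (v - 100) s = PySem.Int.floordiv (v + s - 100) s - 1 := by
      rw [PySem.Int.floordiv_eq_ediv_of_pos hs, PySem.Int.floordiv_eq_ediv_of_pos hs]
      have h1 : v - 100 = (v + s - 100) + (-1) * s := by ring
      rw [h1, Int.add_mul_ediv_right _ _ (by omega : s ≠ 0)]
      ring
    rw [h]; ring
  · rw [if_neg hv2]
    have h : PySem.Int.floordiv (v - 100) s = -1 := by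
      rw [PySem.Int.floordiv_eq_iff_of_pos hs]
      constructor <;> omega
    rw [h]; ring

-- A's counting loop computes the ceiling division, given a positive speed
theorem daysLoopA_eq (speeds : List Int) (i : Nat) (v day : Int)
    (hs : 0 < PySem.List.pyGetD speeds (i : Int) 1) :
    daysLoopA speeds i v day =
      day + (if v < 100 then -(PySem.Int.floordiv (v - 100) (PySem.List.pyGetD speeds (i : Int) 1)) else 0) := by
  by_cases hv : v < 100
  · rw [daysLoopA]
    rw [dif_pos (show v < 100 ∧ 0 < PySem.List.pyGetD speeds (i : Int) 1 from ⟨hv, hs⟩)]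
    rw [daysLoopA_eq speeds i (v + PySem.List.pyGetD speeds (i : Int) 1) (day + 1) hs]
    rw [if_pos hv, ceil_step _ _ hs hv]
    split <;> ring
  · rw [daysLoopA]
    rw [dif_neg (by omega : ¬(v < 100 ∧ 0 < PySem.List.pyGetD speeds (i : Int) 1)), if_neg hv, add_zero]
termination_by (100 - v).toNat
decreasing_by omega

-- under Pre_, A's per-feature day equals B's closed form
theorem days_eq (speeds : List Int) (i : Nat) (p : Int)
    (h : 100 ≤ p ∨ (i < speeds.length ∧ 1 ≤ speeds.getD i 0)) :
    daysLoopA speeds i p 0 = dayB speeds i p := by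
  by_cases hp : p < 100
  · rcases h with h | ⟨hi, hs⟩
    · omega
    · have hgd : PySem.List.pyGetD speeds (i : Int) 1 = speeds.getD i 0 := by
        rw [PySem.List.pyGetD_natCast]
        rw [List.getD_eq_getElem _ 1 hi, List.getD_eq_getElem _ 0 hi]
      rw [daysLoopA_eq speeds i p 0 (by rw [hgd]; omega)]
      rw [if_pos hp]
      rw [dayB, if_neg (by omega), hgd]
      ring
  · rw [daysLoopA]
    rw [dif_neg (by omega : ¬(p < 100 ∧ 0 < PySem.List.pyGetD speeds (i : Int) 1))]
    rw [dayB, if_pos (by omega)]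

-- B's loop is the fold of stepB over A's execute_days list (under Pre_, index-shifted)
theorem loopB_eq_fold (progresses speeds : List Int) (i : Nat) (st : List Int × Int × Int)
    (h : ∀ j ∈ List.range progresses.length,
      100 ≤ progresses.getD j 0 ∨ (i + j < speeds.length ∧ 1 ≤ speeds.getD (i + j) 0)) :
    loopB progresses speeds i st = (buildDaysA progresses speeds i).foldl stepB st := by
  induction progresses generalizing i st with
  | nil => simp [loopB, buildDaysA]
  | cons p rest ih =>
    simp only [loopB, buildDaysA, List.foldl_cons]
    have hd : daysLoopA speeds i p 0 = dayB speeds i p := by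
      apply days_eq
      have := h 0 (by simp)
      simpa using this
    rw [← hd]
    apply ih
    intro j hj
    have hshift : i + 1 + j = i + (j + 1) := by omega
    have := h (j + 1) (by simp at hj ⊢; omega)
    simp only [List.getD_cons_succ] at this
    rw [hshift]
    exact this

-- grouping: the fused fold equals A's pop-based nested loops, given an open group
theorem fold_group (xs : List Int) (ret : List Int) (leader : Int) (count : Int)
    (hc : 1 ≤ count) :
    finB (xs.foldl stepB (ret, leader, count)) =
      ret ++ ((innerA leader xs count).1 :: outerA (innerA leader xs count).2) := by
  induction xs generalizing ret leader count with
  | nil =>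
    rw [innerA, outerA]
    simp only [List.foldl_nil, finB]
    rw [if_pos (show (ret, leader, count).2.2 > 0 by simp; omega)]
  | cons d tl ih =>
    by_cases hd : leader < d
    · have hcp : count > (0 : Int) := by omega
      have h1 : stepB (ret, leader, count) d = (ret ++ [count], d, 1) := by
        simp [stepB, hd, hcp]
      rw [List.foldl_cons, h1, ih _ _ _ (by omega)]
      have hin : innerA leader (d :: tl) count = (count, d :: tl) := by
        simp [innerA]; omega
      rw [hin]
      rw [outerA]
      simp
    · have hne : ¬((ret, leader, count).2.2 = 0 ∨ d > (ret, leader, count).2.1) := by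
        simp; omega
      have h1 : stepB (ret, leader, count) d = (ret, leader, count + 1) := by
        rw [stepB, if_neg hne]
      rw [List.foldl_cons, h1, ih _ _ _ (by omega)]
      have hin : innerA leader (d :: tl) count = innerA leader tl (count + 1) := by
        rw [innerA, if_pos (by omega : leader ≥ d)]
      rw [hin]

-- the whole grouping phase: A's outer loop equals B's fold from the empty state
theorem outerA_eq_loopB (xs : List Int) :
    outerA xs = finB (xs.foldl stepB ([], 0, 0)) := by
  cases xs with
  | nil => rw [outerA]; simp [finB]
  | cons d tl =>
    have h1 : stepB ([], 0, 0) d = ([], d, 1) := by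
      simp [stepB]
    rw [List.foldl_cons, h1, fold_group tl [] d 1 (by omega)]
    rw [outerA]
    simp

-- ===== VERDICT (by name: the statement is the Claim_ definition above) =====
theorem solution_16_spec : Claim_equal_solution_16 := by
  intro progresses speeds _hdom hpre
  unfold Spec_solution_16 solution_16 solution_16_alt
  have hp' : ∀ j ∈ List.range progresses.length,
      100 ≤ progresses.getD j 0 ∨ (0 + j < speeds.length ∧ 1 ≤ speeds.getD (0 + j) 0) := by
    intro j hj
    have := hpre j hj
    simpa using this
  rw [loopB_eq_fold progresses speeds 0 ([], 0, 0) hp']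
  exact outerA_eq_loopB _
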